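-- pv_equiv track=rewrite | github.com/jpuigcerver/PyLaia | laia/utils/segmentation.py | word_segmentation
-- ===== SOURCE A (Python) =====
-- from typing import List, Tuple, Optional
--
-- def word_segmentation(
--     segmentation: List[Tuple[str, int, int, int, int]],
--     space: str,
--     include_spaces: bool = True,
-- ) -> List[Tuple[str, int, int, int, int]]:
--     pairs = list(zip(segmentation, segmentation[1:]))
--     assert all(s1[3] + 1 == s2[1] for s1, s2 in pairs)
--     assert all(s1[2] == s2[2] for s1, s2 in pairs)
--     assert all(s1[4] == s2[4] for s1, s2 in pairs)
--     out = []
--     w, w_x1, w_x2 = "", None, None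
--     for i, (c, x1, y1, x2, y2) in enumerate(segmentation):
--         if c == space:
--             if w:
--                 out.append((w, w_x1, y1, w_x2, y2))
--             if include_spaces:
--                 out.append((c, x1, y1, x2, y2))
--             w = ""
--             w_x1 = x2 + 1
--         else:
--             if i == 0:
--
--                 w_x1 = x1
--             w += c
--             w_x2 = x2
--         if i == len(segmentation) - 1 and w:
--             out.append((w, w_x1, y1, x2, y2))
--     return out
-- ===== SOURCE B (Python) =====
-- def word_segmentation(segmentation, space, include_spaces=True):
--     for a, b in zip(segmentation, segmentation[1:]):
--         assert a[3] + 1 == b[1] and a[2] == b[2] and a[4] == b[4]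
--     out = []
--     i, n = 0, len(segmentation)
--     while i < n:
--         c, x1, y1, x2, y2 = segmentation[i]
--         if c == space:
--             if include_spaces:
--                 out.append(segmentation[i])
--             i += 1
--         else:
--             j = i + 1
--             while j < n and segmentation[j][0] != space:
--                 j += 1
--             word = "".join(s[0] for s in segmentation[i:j])
--             if word:
--                 out.append((word, x1, y1, segmentation[j - 1][3], y2))
--             i = j
--     return out
-- ===== Notes on version B (the rewrite author's own statement) =====
-- stated objective: alternative
-- what changed: A's character-by-character state machine carrying a growing word and w_x1/w_x2 registers (with special first/last-index handling) is replaced by direct extraction of maximal non-space runs: each run is emitted as one tuple built from the run's first and last entries, spaces are emitted as they stand.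
import Mathlib
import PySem

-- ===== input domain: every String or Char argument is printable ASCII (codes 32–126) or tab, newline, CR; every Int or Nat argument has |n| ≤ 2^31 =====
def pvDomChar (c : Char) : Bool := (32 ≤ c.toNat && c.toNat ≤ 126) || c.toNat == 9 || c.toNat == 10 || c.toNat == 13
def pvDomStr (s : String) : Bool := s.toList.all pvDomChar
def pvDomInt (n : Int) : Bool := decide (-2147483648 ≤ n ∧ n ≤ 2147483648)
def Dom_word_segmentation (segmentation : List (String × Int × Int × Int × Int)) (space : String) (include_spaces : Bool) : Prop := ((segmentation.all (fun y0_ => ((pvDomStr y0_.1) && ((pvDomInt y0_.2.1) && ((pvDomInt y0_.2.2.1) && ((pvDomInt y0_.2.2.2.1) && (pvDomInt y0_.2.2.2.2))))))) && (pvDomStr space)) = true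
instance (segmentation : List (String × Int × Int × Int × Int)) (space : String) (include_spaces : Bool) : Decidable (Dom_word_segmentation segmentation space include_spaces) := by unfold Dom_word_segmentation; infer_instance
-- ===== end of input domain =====

-- B replaces A's running word/x-register state machine by extraction of maximal non-space
-- runs (objective: alternative decomposition, same linear cost).

-- ===== PORT A =====
-- A's single for-loop over enumerate(segmentation), state (out, w, w_x1, w_x2).
-- w_x1/w_x2 mirror Python's None as Option Int; `.getD 0` at an append site is exact
-- because in Python that append is guarded by w being non-empty, which forces both set.
def wsLoop (space : String) (include_spaces : Bool) (n : Nat) :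
    List (String × Int × Int × Int × Int) → Nat → List (String × Int × Int × Int × Int) →
      String → Option Int → Option Int → List (String × Int × Int × Int × Int)
  | [], _, out, _, _, _ => out
  | (c, x1, y1, x2, y2) :: rest, i, out, w, wx1, wx2 =>
    if c = space then
      let out1 := if w ≠ "" then out ++ [(w, wx1.getD 0, y1, wx2.getD 0, y2)] else out
      let out2 := if include_spaces then out1 ++ [(c, x1, y1, x2, y2)] else out1
      let w1 := ""
      let wx1' := some (x2 + 1)
      let out3 := if i = n - 1 ∧ w1 ≠ "" then out2 ++ [(w1, wx1'.getD 0, y1, x2, y2)] else out2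
      wsLoop space include_spaces n rest (i + 1) out3 w1 wx1' wx2
    else
      let wx1' := if i = 0 then some x1 else wx1
      let w1 := w ++ c
      let wx2' := some x2
      let out3 := if i = n - 1 ∧ w1 ≠ "" then out ++ [(w1, wx1'.getD 0, y1, x2, y2)] else out
      wsLoop space include_spaces n rest (i + 1) out3 w1 wx1' wx2'

def word_segmentation (segmentation : List (String × Int × Int × Int × Int)) (space : String) (include_spaces : Bool) : List (String × Int × Int × Int × Int) :=
  wsLoop space include_spaces segmentation.length segmentation 0 [] "" none none

-- ===== PORT B =====
-- B scans for the next maximal run of non-space entries (the inner `while j < n` scan of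
-- Source B, here takeWhile/dropWhile) and emits one tuple per run; space entries are emitted
-- one by one when include_spaces.
def pvNS (space : String) (s : String × Int × Int × Int × Int) : Bool := !(s.1 == space)

def wbLoop (space : String) (include_spaces : Bool) :
    List (String × Int × Int × Int × Int) → List (String × Int × Int × Int × Int)
  | [] => []
  | (c, x1, y1, x2, y2) :: xs =>
    if c = space then
      (if include_spaces then [(c, x1, y1, x2, y2)] else []) ++ wbLoop space include_spaces xs
    else
      (if PySem.Str.join "" (((c, x1, y1, x2, y2) :: xs.takeWhile (pvNS space)).map (·.1)) ≠ "" then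
        [(PySem.Str.join "" (((c, x1, y1, x2, y2) :: xs.takeWhile (pvNS space)).map (·.1)), x1, y1,
          ((xs.takeWhile (pvNS space)).getLastD (c, x1, y1, x2, y2)).2.2.2.1, y2)]
       else []) ++ wbLoop space include_spaces (xs.dropWhile (pvNS space))
  termination_by l => l.length
  decreasing_by
  · simp
  · have := List.length_dropWhile_le (p := pvNS space) (l := xs)
    simp only [List.length_cons]
    omega

def word_segmentation_alt (segmentation : List (String × Int × Int × Int × Int)) (space : String) (include_spaces : Bool) : List (String × Int × Int × Int × Int) :=
  wbLoop space include_spaces segmentation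

-- ===== PRECONDITION & SPEC =====
-- adjacency relation demanded by A's three asserts: x-contiguity and equal y1/y2
abbrev pvChainRel (a b : String × Int × Int × Int × Int) : Prop :=
  a.2.2.2.1 + 1 = b.2.1 ∧ a.2.2.1 = b.2.2.1 ∧ a.2.2.2.2 = b.2.2.2.2

-- Pre_ excludes exactly the inputs on which A's three asserts raise AssertionError.
def Pre_word_segmentation (segmentation : List (String × Int × Int × Int × Int)) (space : String) (include_spaces : Bool) : Prop :=
  List.IsChain pvChainRel segmentation

instance (segmentation : List (String × Int × Int × Int × Int)) (space : String) (include_spaces : Bool) : Decidable (Pre_word_segmentation segmentation space include_spaces) := by unfold Pre_word_segmentation; infer_instance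

def pvWitness_word_segmentation : (List (String × Int × Int × Int × Int)) × String × Bool :=
  ([("h", 0, 0, 2, 9), ("i", 3, 0, 4, 9), (" ", 5, 0, 6, 9), ("u", 7, 0, 9, 9)], " ", true)

def Spec_word_segmentation (segmentation : List (String × Int × Int × Int × Int)) (space : String) (include_spaces : Bool) (out : List (String × Int × Int × Int × Int)) : Prop := out = word_segmentation_alt segmentation space include_spaces
instance (segmentation : List (String × Int × Int × Int × Int)) (space : String) (include_spaces : Bool) (out : List (String × Int × Int × Int × Int)) : Decidable (Spec_word_segmentation segmentation space include_spaces out) := by unfold Spec_word_segmentation; infer_instance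

-- ===== CLAIM (what is proved, stated in full; the proofs are below) =====
def Claim_equal_word_segmentation : Prop := ∀ (segmentation : List (String × Int × Int × Int × Int)) (space : String) (include_spaces : Bool), Dom_word_segmentation segmentation space include_spaces → Pre_word_segmentation segmentation space include_spaces → Spec_word_segmentation segmentation space include_spaces (word_segmentation segmentation space include_spaces)

-- ===== LEMMAS AND PROOFS =====

theorem pvLastD {α : Type} (a d : α) (l : List α) :
    ((a :: l).getLast?).getD d = (l.getLast?).getD a := by
  induction l generalizing a d with
  | nil => rfl
  | cons b t ih => rw [List.getLast?_cons_cons, ih b d, ih b a]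

theorem pvJoin_nil : PySem.Str.join "" ([] : List String) = "" := by decide

theorem pvJoin_cons (a : String) (l : List String) :
    PySem.Str.join "" (a :: l) = a ++ PySem.Str.join "" l := by
  cases l <;>
    simp [PySem.Str.join, PySem.Chars.join, List.intercalate,
      String.toList_ofList, List.intersperse]

-- proof-side mirror of A's loop once a word w (possibly "") with left edge u is pending
def wbCont (space : String) (inc : Bool) :
    String → Int → List (String × Int × Int × Int × Int) → List (String × Int × Int × Int × Int)
  | _, _, [] => []
  | w, u, (c, x1, y1, x2, y2) :: xs =>
    if c = space then
      (if w ≠ "" then [(w, u, y1, x1 - 1, y2)] else []) ++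
        (if inc then [(c, x1, y1, x2, y2)] else []) ++ wbLoop space inc xs
    else
      match xs with
      | [] => if w ++ c ≠ "" then [(w ++ c, u, y1, x2, y2)] else []
      | _ :: _ => wbCont space inc (w ++ c) u xs

-- closing the pending word over the rest of the list = B's run tuple for the current run
theorem wbCont_run (space : String) (inc : Bool) :
    ∀ (xs : List (String × Int × Int × Int × Int)) (p : String × Int × Int × Int × Int)
      (w : String) (u : Int), ¬ p.1 = space → List.IsChain pvChainRel (p :: xs) → xs ≠ [] →
    wbCont space inc (w ++ p.1) u xs =
      (if w ++ PySem.Str.join "" ((p :: xs.takeWhile (pvNS space)).map (·.1)) ≠ "" then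
        [(w ++ PySem.Str.join "" ((p :: xs.takeWhile (pvNS space)).map (·.1)), u, p.2.2.1,
          ((xs.takeWhile (pvNS space)).getLastD p).2.2.2.1, p.2.2.2.2)]
       else []) ++ wbLoop space inc (xs.dropWhile (pvNS space)) := by
  intro xs
  induction xs with
  | nil => intro p w u _ _ h; exact absurd rfl h
  | cons y ys ih =>
    intro p w u hp hc _
    obtain ⟨c1, a1, b1, a2, b2⟩ := p
    obtain ⟨cy, e1, f1, e2, f2⟩ := y
    obtain ⟨hx, hy1, hy2⟩ := (List.isChain_cons_cons.mp hc).1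
    simp only [] at hx hy1 hy2
    by_cases hys : cy = space
    · -- the run is [p] alone, closed by the space y
      subst hys
      have ha2 : e1 - 1 = a2 := by omega
      simp [wbCont, wbLoop, pvNS, List.takeWhile_cons, List.dropWhile_cons,
        pvJoin_cons, pvJoin_nil, String.append_empty, ← hy1, ← hy2, ha2]
    · cases ys with
      | nil =>
        simp [wbCont, wbLoop, hys, pvNS, List.takeWhile_cons, List.dropWhile_cons,
          pvJoin_cons, pvJoin_nil, String.append_empty, String.append_assoc, ← hy1, ← hy2]
      | cons z zs =>
        have hstep : wbCont space inc (w ++ c1) u ((cy, e1, f1, e2, f2) :: z :: zs) =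
            wbCont space inc ((w ++ c1) ++ cy) u (z :: zs) := by
          simp [wbCont, hys]
        rw [hstep, ih (cy, e1, f1, e2, f2) (w ++ c1) u hys hc.tail (by simp)]
        simp [pvNS, hys, List.takeWhile_cons, List.dropWhile_cons, pvJoin_cons,
          pvLastD, String.append_assoc, ← hy1, ← hy2]

theorem pvMain (space : String) (inc : Bool)
    (seg : List (String × Int × Int × Int × Int)) :
    (∀ (n i : Nat) (out : List (String × Int × Int × Int × Int)) (wx1 wx2 : Option Int),
      n = i + seg.length → List.IsChain pvChainRel seg →
      (∀ x xs, seg = x :: xs → ¬ x.1 = space → i ≠ 0 → wx1 = some x.2.1) →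
      wsLoop space inc n seg i out "" wx1 wx2 = out ++ wbLoop space inc seg)
    ∧
    (∀ (n i : Nat) (out : List (String × Int × Int × Int × Int)) (w : String) (u v : Int),
      n = i + seg.length → List.IsChain pvChainRel seg → i ≠ 0 →
      (∀ x xs, seg = x :: xs → x.2.1 = v + 1) →
      wsLoop space inc n seg i out w (some u) (some v) = out ++ wbCont space inc w u seg) := by
  induction seg with
  | nil =>
    constructor
    · intro n i out wx1 wx2 _ _ _; simp [wsLoop, wbLoop]
    · intro n i out w u v _ _ _ _; simp [wsLoop, wbCont]
  | cons x xs ih =>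
    obtain ⟨c, x1, y1, x2, y2⟩ := x
    constructor
    · -- no word pending
      intro n i out wx1 wx2 hn hc h1
      rw [wsLoop]
      by_cases hcs : c = space
      · -- space entry: emit it (maybe), stay with no pending word
        simp only [if_pos hcs, ne_eq, not_true_eq_false, if_false, false_and, ite_false]
        rw [ih.1 n (i + 1) _ (some (x2 + 1)) wx2
          (by simp only [List.length_cons] at hn ⊢; omega) hc.tail
          (by rintro yy yys rfl _ _; simp only [(List.isChain_cons_cons.mp hc).1.1])]
        cases inc <;> simp [wbLoop, hcs, List.append_assoc]
      · -- non-space entry: a run starts here with left edge x1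
        have hu : (if i = 0 then some x1 else wx1) = some x1 := by
          by_cases hi : i = 0
          · simp [hi]
          · simpa [hi] using h1 _ _ rfl hcs hi
        simp only [if_neg hcs, hu]
        cases xs with
        | nil =>
          have hin : i = n - 1 := by simp only [List.length_cons, List.length_nil] at hn; omega
          by_cases hce : c = ""
          · subst hce
            simp [wsLoop, wbLoop, hcs, pvJoin_cons, pvJoin_nil,
              String.append_empty, String.empty_append]
          · simp [wsLoop, wbLoop, hcs, hce, hin, pvJoin_cons, pvJoin_nil,
              String.append_empty, String.empty_append]
        | cons y ys =>
          have hni : ¬ i = n - 1 := by simp only [List.length_cons] at hn; omega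
          have hrun := wbCont_run space inc (y :: ys) (c, x1, y1, x2, y2) "" x1 hcs hc (by simp)
          simp only [String.empty_append] at hrun
          simp only [hni, false_and, if_false, ite_false]
          rw [ih.2 n (i + 1) out ("" ++ c) x1 x2
            (by simp only [List.length_cons] at hn ⊢; omega) hc.tail (by omega)
            (by intro yy yys heq; injection heq with h1 _; subst h1
                have h := (List.isChain_cons_cons.mp hc).1.1
                simp only [] at h; exact h.symm)]
          simp only [String.empty_append]
          rw [hrun]
          simp [wbLoop, hcs]
    · -- word w pending with left edge u; its right x-edge so far is v
      intro n i out w u v hn hc hi hv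
      rw [wsLoop]
      by_cases hcs : c = space
      · -- the space closes the pending word
        have hx1 : x1 - 1 = v := by have := hv _ _ rfl; simp at this; omega
        simp only [if_pos hcs, Option.getD_some, ne_eq, not_true_eq_false, if_false,
          false_and, ite_false]
        rw [ih.1 n (i + 1) _ (some (x2 + 1)) (some v)
          (by simp only [List.length_cons] at hn ⊢; omega) hc.tail
          (by rintro yy yys rfl _ _; simp only [(List.isChain_cons_cons.mp hc).1.1])]
        rw [show wbCont space inc w u ((c, x1, y1, x2, y2) :: xs) =
            (if w ≠ "" then [(w, u, y1, x1 - 1, y2)] else []) ++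
              (if inc then [(c, x1, y1, x2, y2)] else []) ++ wbLoop space inc xs from by
          simp [wbCont, hcs]]
        rw [hx1]
        by_cases hw : w = "" <;> cases inc <;> simp [hw, List.append_assoc]
      · have hi0 : ¬ i = 0 := hi
        simp only [if_neg hcs, if_neg hi0, Option.getD_some]
        cases xs with
        | nil =>
          have hin : i = n - 1 := by simp only [List.length_cons, List.length_nil] at hn; omega
          by_cases hce : w ++ c = ""
          · simp [wsLoop, wbCont, hcs, hce]
          · simp [wsLoop, wbCont, hcs, hce, hin]
        | cons y ys =>
          have hni : ¬ i = n - 1 := by simp only [List.length_cons] at hn; omega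
          simp only [hni, false_and, if_false, ite_false]
          rw [ih.2 n (i + 1) out (w ++ c) u x2
            (by simp only [List.length_cons] at hn ⊢; omega) hc.tail (by omega)
            (by intro yy yys heq; injection heq with h1 _; subst h1
                have h := (List.isChain_cons_cons.mp hc).1.1
                simp only [] at h; exact h.symm)]
          simp [wbCont, hcs]

-- ===== VERDICT (by name: the statement is the Claim_ definition above) =====
theorem word_segmentation_spec : Claim_equal_word_segmentation := by
  intro seg space inc _ hpre
  unfold Spec_word_segmentation word_segmentation word_segmentation_alt
  have h := (pvMain space inc seg).1 seg.length 0 [] none none (by omega) hpre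
    (by intro x xs _ _ hi; exact absurd rfl hi)
  simpa using h
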